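-- pv_equiv track=rewrite | github.com/Nellur35/taintly | taintly/testing/mutations.py | mutate_quote_swap
-- ===== SOURCE A (Python) =====
-- def mutate_quote_swap(sample: str) -> list[str]:
--     """Swap single and double quotes.
--
--     Only emits a mutant when the swap preserves balanced quoting —
--     `run: echo "it's fine"` naively becomes `run: echo "it"s fine"`,
--     which is YAML-invalid and makes the rule's correct skip look like
--     a miss to the harness (inflating the survivor count).
--     """
--     mutations = []
--     for mutated in (sample.replace("'", '"'), sample.replace('"', "'")):
--         if mutated == sample:
--             continue
--         # Unbalanced quote counts imply we mangled the input; a rule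
--         # that correctly skips a syntactically invalid mutant should
--         # not be scored as a false negative.
--         if mutated.count('"') % 2 != 0 or mutated.count("'") % 2 != 0:
--             continue
--         mutations.append(mutated)
--     return mutations
-- ===== SOURCE B (Python) =====
-- def mutate_quote_swap(sample: str) -> list[str]:
--     """Swap single and double quotes, emitting only balanced mutants.
--
--     One character-level pass builds both candidate mutants and, at the
--     same time, the parity of the total quote count and whether each
--     quote kind occurs at all; no replace() or count() passes needed.
--     A mutant is balanced iff the total quote count is even, and differs
--     from the input iff the quote kind it rewrites actually occurs.
--     """
--     to_double = []   # chars of the '->" mutant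
--     to_single = []   # chars of the "->' mutant
--     parity = 0
--     seen_single = False
--     seen_double = False
--     for ch in sample:
--         if ch == "'":
--             to_double.append('"')
--             to_single.append(ch)
--             parity ^= 1
--             seen_single = True
--         elif ch == '"':
--             to_double.append(ch)
--             to_single.append("'")
--             parity ^= 1
--             seen_double = True
--         else:
--             to_double.append(ch)
--             to_single.append(ch)
--     if parity:
--         return []
--     mutations = []
--     if seen_single:
--         mutations.append(''.join(to_double))
--     if seen_double:
--         mutations.append(''.join(to_single))
--     return mutations
-- ===== Notes on version B (the rewrite author's own statement) =====
-- stated objective: alternative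
-- what changed: Replaces A's generate-then-filter loop (build each mutant via replace, compare with the input, re-count its quotes) by a single character-level scan that simultaneously builds both mutants, the parity of the total quote count and per-kind presence flags, then emits from those flags.
import Mathlib
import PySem

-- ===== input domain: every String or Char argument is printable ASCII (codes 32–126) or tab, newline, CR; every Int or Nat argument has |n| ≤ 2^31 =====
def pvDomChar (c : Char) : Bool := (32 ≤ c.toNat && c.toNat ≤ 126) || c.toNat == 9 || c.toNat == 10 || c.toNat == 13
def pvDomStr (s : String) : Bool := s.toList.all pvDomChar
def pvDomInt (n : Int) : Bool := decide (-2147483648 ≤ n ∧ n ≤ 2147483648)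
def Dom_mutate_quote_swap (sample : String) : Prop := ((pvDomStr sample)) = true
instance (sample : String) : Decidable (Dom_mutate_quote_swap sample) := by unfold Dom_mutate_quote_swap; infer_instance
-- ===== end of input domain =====

-- B replaces A's generate-then-filter loop (replace, compare, re-count per mutant)
-- by one character-level scan building both mutants, the quote-count parity and
-- presence flags simultaneously (objective: alternative).

-- ===== PORT A =====
def mutate_quote_swap (sample : String) : List String :=
  [PySem.Str.replace sample "'" "\"", PySem.Str.replace sample "\"" "'"].foldl
    (fun mutations mutated =>
      if mutated = sample then mutations
      else if PySem.Str.count mutated "\"" % 2 ≠ 0 ∨ PySem.Str.count mutated "'" % 2 ≠ 0 then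
        mutations
      else mutations ++ [mutated])
    []

-- ===== PORT B =====
-- state: (to_double, to_single, parity, seen_single, seen_double);
-- Python's 0/1 `parity ^= 1` int flag is ported as a Bool toggled with `!`.
def pvStep (st : List Char × List Char × Bool × Bool × Bool) (ch : Char) :
    List Char × List Char × Bool × Bool × Bool :=
  let (td, ts, par, ss, sd) := st
  if ch = '\'' then (td ++ ['"'], ts ++ [ch], !par, true, sd)
  else if ch = '"' then (td ++ [ch], ts ++ ['\''], !par, ss, true)
  else (td ++ [ch], ts ++ [ch], par, ss, sd)

def mutate_quote_swap_alt (sample : String) : List String :=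
  let st := sample.toList.foldl pvStep ([], [], false, false, false)
  if st.2.2.1 then []
  else
    (if st.2.2.2.1 then [String.ofList st.1] else []) ++
    (if st.2.2.2.2 then [String.ofList st.2.1] else [])

-- ===== PRECONDITION & SPEC =====
def Spec_mutate_quote_swap (sample : String) (out : List String) : Prop := out = mutate_quote_swap_alt sample
instance (sample : String) (out : List String) : Decidable (Spec_mutate_quote_swap sample out) := by unfold Spec_mutate_quote_swap; infer_instance

-- ===== CLAIM (what is proved, stated in full; the proofs are below) =====
def Claim_equal_mutate_quote_swap : Prop := ∀ (sample : String), Dom_mutate_quote_swap sample → Spec_mutate_quote_swap sample (mutate_quote_swap sample)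

-- ===== LEMMAS AND PROOFS =====

theorem pv_count_go_single (c : Char) (l : List Char) (fuel acc : Nat) (h : l.length ≤ fuel) :
    PySem.Chars.count.go [c] fuel l acc = acc + l.count c := by
  induction l generalizing fuel acc with
  | nil => cases fuel <;> simp [PySem.Chars.count.go]
  | cons x t ih =>
    cases fuel with
    | zero => simp at h
    | succ n =>
      simp only [List.length_cons, Nat.succ_le_succ_iff] at h
      by_cases hx : c = x
      · subst hx
        simp [PySem.Chars.count.go, List.isPrefixOf, ih _ _ h]
        omega
      · simp [PySem.Chars.count.go, List.isPrefixOf, beq_iff_eq, hx,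
          ih _ _ h, Ne.symm hx]

theorem pv_count_single (s : List Char) (c : Char) :
    PySem.Chars.count s [c] = s.count c := by
  simp [PySem.Chars.count, pv_count_go_single c s s.length 0 le_rfl]

theorem pv_replace_go_single (c d : Char) (l : List Char) (fuel : Nat) (acc : List Char)
    (h : l.length ≤ fuel) :
    PySem.Chars.replace.go [c] [d] fuel l acc =
      acc.reverse ++ l.map (fun x => if x = c then d else x) := by
  induction l generalizing fuel acc with
  | nil => cases fuel <;> simp [PySem.Chars.replace.go]
  | cons x t ih =>
    cases fuel with
    | zero => simp at h
    | succ n =>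
      simp only [List.length_cons, Nat.succ_le_succ_iff] at h
      by_cases hx : x = c
      · subst hx
        simp [PySem.Chars.replace.go, List.isPrefixOf, ih _ _ h]
      · simp [PySem.Chars.replace.go, List.isPrefixOf, beq_iff_eq, Ne.symm hx, hx,
          ih _ _ h]

theorem pv_replace_single (s : List Char) (c d : Char) :
    PySem.Chars.replace s [c] [d] = s.map (fun x => if x = c then d else x) := by
  simp [PySem.Chars.replace, pv_replace_go_single c d s s.length [] le_rfl]

theorem pv_count_map_swap (s : List Char) (c d : Char) (hcd : c ≠ d) :
    (s.map (fun x => if x = c then d else x)).count d = s.count c + s.count d := by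
  induction s with
  | nil => simp
  | cons x t ih =>
    by_cases hx : x = c
    · subst hx; simp [hcd, ih]; omega
    · by_cases hd : x = d
      · subst hd; simp [hx, ih]; omega
      · simp [hx, hd, ih]

theorem pv_count_map_gone (s : List Char) (c d : Char) (hcd : c ≠ d) :
    (s.map (fun x => if x = c then d else x)).count c = 0 := by
  induction s with
  | nil => simp
  | cons x t ih =>
    by_cases hx : x = c
    · subst hx; simp [Ne.symm hcd, ih]
    · simp [hx, ih]

theorem pv_map_eq_self_iff (s : List Char) (c d : Char) (hcd : c ≠ d) :
    s.map (fun x => if x = c then d else x) = s ↔ s.count c = 0 := by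
  induction s with
  | nil => simp
  | cons x t ih =>
    by_cases hx : x = c
    · subst hx
      simp only [List.map_cons, if_pos rfl, List.count_cons_self]
      constructor
      · intro h
        exact absurd (List.cons.injEq d _ x t ▸ h).1 (Ne.symm hcd)
      · intro h; omega
    · simp [hx, ih]

theorem pv_str_replace_toList (sample : String) (c d : Char) :
    (PySem.Str.replace sample (String.ofList [c]) (String.ofList [d])).toList =
      sample.toList.map (fun x => if x = c then d else x) := by
  simp [PySem.Str.replace, String.toList_ofList, pv_replace_single]

theorem pv_str_eq_iff_toList (a b : String) : a = b ↔ a.toList = b.toList := by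
  constructor
  · intro h; rw [h]
  · intro h; exact String.ext (by simpa using h)

-- characterisation of B's single-pass fold
theorem pv_parity_toggle (par : Bool) (n : Nat) :
    xor (!par) (decide (n % 2 = 1)) = xor par (decide ((n + 1) % 2 = 1)) := by
  have := Nat.mod_two_eq_zero_or_one n
  rcases par <;> rcases this with h | h <;> simp [h, Nat.add_mod]

theorem pv_fold_char (l : List Char) (td ts : List Char) (par ss sd : Bool) :
    l.foldl pvStep (td, ts, par, ss, sd) =
      (td ++ l.map (fun x => if x = '\'' then '"' else x),
       ts ++ l.map (fun x => if x = '"' then '\'' else x),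
       xor par (decide ((l.count '\'' + l.count '"') % 2 = 1)),
       ss || decide (l.count '\'' ≠ 0),
       sd || decide (l.count '"' ≠ 0)) := by
  induction l generalizing td ts par ss sd with
  | nil => simp
  | cons x t ih =>
    by_cases hx : x = '\''
    · subst hx
      rw [List.foldl_cons,
        show pvStep (td, ts, par, ss, sd) '\'' = (td ++ ['"'], ts ++ ['\''], !par, true, sd)
          from rfl, ih]
      refine Prod.ext ?_ (Prod.ext ?_ (Prod.ext ?_ (Prod.ext ?_ ?_)))
      · simp
      · simp
      · show xor (!par) _ = xor par _
        have h1 : List.count '\'' ('\'' :: t) = t.count '\'' + 1 := by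
          simp [List.count_cons]
        have h2 : List.count '"' ('\'' :: t) = t.count '"' := by
          simp [List.count_cons]
        rw [h1, h2, show t.count '\'' + 1 + t.count '"' = t.count '\'' + t.count '"' + 1 by omega]
        exact pv_parity_toggle par _
      · simp [List.count_cons]
      · simp [List.count_cons]
    · by_cases hd : x = '"'
      · subst hd
        rw [List.foldl_cons,
          show pvStep (td, ts, par, ss, sd) '"' = (td ++ ['"'], ts ++ ['\''], !par, ss, true)
            from rfl, ih]
        refine Prod.ext ?_ (Prod.ext ?_ (Prod.ext ?_ (Prod.ext ?_ ?_)))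
        · simp
        · simp
        · show xor (!par) _ = xor par _
          have h1 : List.count '\'' ('"' :: t) = t.count '\'' := by
            simp [List.count_cons]
          have h2 : List.count '"' ('"' :: t) = t.count '"' + 1 := by
            simp [List.count_cons]
          rw [h1, h2, show t.count '\'' + (t.count '"' + 1) = t.count '\'' + t.count '"' + 1
            by omega]
          exact pv_parity_toggle par _
        · simp [List.count_cons]
        · simp [List.count_cons]
      · rw [List.foldl_cons,
          show pvStep (td, ts, par, ss, sd) x = (td ++ [x], ts ++ [x], par, ss, sd) by
            simp [pvStep, hx, hd], ih]
        have h1 : List.count '\'' (x :: t) = t.count '\'' := by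
          simp [List.count_cons, hx]
        have h2 : List.count '"' (x :: t) = t.count '"' := by
          simp [List.count_cons, hd]
        simp [h1, h2, hx, hd]

-- ===== VERDICT (by name: the statement is the Claim_ definition above) =====
theorem mutate_quote_swap_spec : Claim_equal_mutate_quote_swap := by
  intro sample _
  unfold Spec_mutate_quote_swap mutate_quote_swap mutate_quote_swap_alt
  have hq : ('\'' : Char) ≠ '"' := by decide
  have hq' : ('"' : Char) ≠ '\'' := by decide
  have h1 : ("'" : String) = String.ofList ['\''] := rfl
  have h2 : ("\"" : String) = String.ofList ['"'] := rfl
  set cs := sample.toList with hcs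
  have e1 : (PySem.Str.replace sample "'" "\"") = sample ↔ cs.count '\'' = 0 := by
    rw [pv_str_eq_iff_toList, h1, h2, pv_str_replace_toList, pv_map_eq_self_iff _ _ _ hq]
  have e2 : (PySem.Str.replace sample "\"" "'") = sample ↔ cs.count '"' = 0 := by
    rw [pv_str_eq_iff_toList, h2, h1, pv_str_replace_toList, pv_map_eq_self_iff _ _ _ hq']
  have c1d : PySem.Str.count (PySem.Str.replace sample "'" "\"") "\"" =
      cs.count '\'' + cs.count '"' := by
    rw [h1, h2, PySem.Str.count, pv_str_replace_toList]
    show PySem.Chars.count _ ['"'] = _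
    rw [pv_count_single, pv_count_map_swap _ _ _ hq]
  have c1s : PySem.Str.count (PySem.Str.replace sample "'" "\"") "'" = 0 := by
    rw [h1, h2, PySem.Str.count, pv_str_replace_toList]
    show PySem.Chars.count _ ['\''] = _
    rw [pv_count_single, pv_count_map_gone _ _ _ hq]
  have c2s : PySem.Str.count (PySem.Str.replace sample "\"" "'") "'" =
      cs.count '\'' + cs.count '"' := by
    rw [h1, h2, PySem.Str.count, pv_str_replace_toList]
    show PySem.Chars.count _ ['\''] = _
    rw [pv_count_single, pv_count_map_swap _ _ _ hq', Nat.add_comm]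
  have c2d : PySem.Str.count (PySem.Str.replace sample "\"" "'") "\"" = 0 := by
    rw [h1, h2, PySem.Str.count, pv_str_replace_toList]
    show PySem.Chars.count _ ['"'] = _
    rw [pv_count_single, pv_count_map_gone _ _ _ hq']
  have s1 : String.ofList (cs.map (fun x => if x = '\'' then '"' else x)) =
      PySem.Str.replace sample "'" "\"" := by
    rw [pv_str_eq_iff_toList, String.toList_ofList, h1, h2, pv_str_replace_toList]
  have s2 : String.ofList (cs.map (fun x => if x = '"' then '\'' else x)) =
      PySem.Str.replace sample "\"" "'" := by
    rw [pv_str_eq_iff_toList, String.toList_ofList, h2, h1, pv_str_replace_toList]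
  rw [pv_fold_char]
  simp only [List.foldl, List.nil_append, e1, e2, c1d, c1s, c2s, c2d, s1, s2]
  rcases Nat.mod_two_eq_zero_or_one (cs.count '\'' + cs.count '"') with hp | hp <;>
    by_cases hs : cs.count '\'' = 0 <;> by_cases hd : cs.count '"' = 0 <;>
      simp only [hp, hs, hd, Bool.xor_false, decide_eq_true_eq, ne_eq, not_true_eq_false,
        not_false_eq_true, decide_true, decide_false, if_true, if_false,
        Bool.false_eq_true, List.nil_append, List.append_nil,
        Nat.zero_ne_one, Nat.one_ne_zero, or_false, false_or, or_true, true_or] <;>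
      simp [hp, hs, hd]
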